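-- pv_equiv track=rewrite | github.com/DApIA-Project/Anomaly-Detection | B_Model/ReplaySolver/Utils/hashing.py | sub_fp
-- ===== SOURCE A (Python) =====
-- def sub_fp(fp):
--     """
--     List all the possible fingerprint variants when there is the N placeholder (same as . from regex)
--     """
--     # remplace each N by R and L variants
--     res = [""]
--     m_count = sum([1 for c in fp if c == "N"])
--     if (m_count == 0):
--         return [fp]
--     if (m_count > 5):
--         return ["N"*len(fp)]
--
--     for c in range(len(fp)):
--         if (fp[c] == "N"):
--             l = len(res)
--             res = res + res
--             for i in range(l):
--                 res[i+l*0] += "R"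
--                 res[i+l*1] += "L"
--         else:
--             for i in range(len(res)):
--                 res[i] += fp[c]
--     return res
-- ===== SOURCE B (Python) =====
-- def sub_fp(fp):
--     n_pos = [i for i, c in enumerate(fp) if c == "N"]
--     m = len(n_pos)
--     if m == 0:
--         return [fp]
--     if m > 5:
--         return ["N" * len(fp)]
--     out = []
--     for mask in range(2 ** m):
--         chars = list(fp)
--         for j, p in enumerate(n_pos):
--             chars[p] = "L" if (mask >> j) & 1 else "R"
--         out.append("".join(chars))
--     return out
-- ===== Notes on version B (the rewrite author's own statement) =====
-- stated objective: alternative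
-- what changed: Replaces A's list-doubling accumulator (duplicate the partial-variant list at each N and append R/L to each half) with a bitmask enumeration: collect the N positions once, then for each mask in range(2**m) assemble one variant directly, mapping the first N to the low bit so the order matches.
import Mathlib
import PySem

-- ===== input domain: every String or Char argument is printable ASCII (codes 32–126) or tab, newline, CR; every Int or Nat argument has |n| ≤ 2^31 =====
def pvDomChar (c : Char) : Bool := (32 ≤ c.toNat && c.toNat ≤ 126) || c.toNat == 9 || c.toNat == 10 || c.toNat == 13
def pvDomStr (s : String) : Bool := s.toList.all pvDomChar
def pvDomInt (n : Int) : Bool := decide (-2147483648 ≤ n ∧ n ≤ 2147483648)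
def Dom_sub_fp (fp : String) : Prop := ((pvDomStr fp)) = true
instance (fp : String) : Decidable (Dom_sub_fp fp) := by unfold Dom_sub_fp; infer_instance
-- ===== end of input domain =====

-- B replaces A's list-doubling accumulator with a bitmask enumeration over the N positions
-- (first N = low bit), same cost, a genuinely different construction (objective: alternative).

-- ===== PORT A =====
-- A's loop body: on 'N' the list is doubled and the first half gets 'R', the second 'L'
-- (A's in-place indexed appends written as the two maps over the halves); otherwise the
-- current character is appended to every variant.  Variants are kept as List Char and
-- turned into Strings at the end.
def subFpStep (res : List (List Char)) (c : Char) : List (List Char) :=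
  if c == 'N' then res.map (· ++ ['R']) ++ res.map (· ++ ['L'])
  else res.map (· ++ [c])

def sub_fp (fp : String) : List String :=
  let cs := fp.toList
  let m_count := (cs.filter (fun c => c == 'N')).length
  if m_count = 0 then [fp]
  else if m_count > 5 then [String.mk (List.replicate cs.length 'N')]
  else (cs.foldl subFpStep [[]]).map String.mk

-- ===== PORT B =====
-- Python's enumerate(xs) with Nat indices (all indices here are nonnegative and in range).
def pvEnum {α : Type} : List α → List (Nat × α)
  | [] => []
  | a :: as => (0, a) :: (pvEnum as).map (fun p => (p.1 + 1, p.2))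

-- Source B's inner loop: for j, p in enumerate(n_pos): chars[p] = 'L' if (mask >> j) & 1 else 'R'
-- ((mask >> j) & 1 == 1 is exactly Nat.testBit mask j).
def pvSetBits (mask : Nat) (cs : List Char) (jps : List (Nat × Nat)) : List Char :=
  jps.foldl (fun ch jp => ch.set jp.2 (if mask.testBit jp.1 then 'L' else 'R')) cs

def sub_fp_alt (fp : String) : List String :=
  let cs := fp.toList
  let npos := ((pvEnum cs).filter (fun p => p.2 == 'N')).map Prod.fst
  if npos.length = 0 then [fp]
  else if npos.length > 5 then [String.mk (List.replicate cs.length 'N')]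
  else (List.range (2 ^ npos.length)).map (fun mask => String.mk (pvSetBits mask cs (pvEnum npos)))

-- ===== PRECONDITION & SPEC =====
def Spec_sub_fp (fp : String) (out : List String) : Prop := out = sub_fp_alt fp
instance (fp : String) (out : List String) : Decidable (Spec_sub_fp fp out) := by unfold Spec_sub_fp; infer_instance

-- ===== CLAIM (what is proved, stated in full; the proofs are below) =====
def Claim_equal_sub_fp : Prop := ∀ (fp : String), Dom_sub_fp fp → Spec_sub_fp fp (sub_fp fp)

-- ===== LEMMAS AND PROOFS =====

def pvCountN (cs : List Char) : Nat := (cs.filter (fun c => c == 'N')).length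

-- the common reference value: the variant of cs selected by mask, first N = low bit
def pvBuild : List Char → Nat → List Char
  | [], _ => []
  | c :: cs, mask =>
    if c == 'N' then (if mask % 2 = 1 then 'L' else 'R') :: pvBuild cs (mask / 2)
    else c :: pvBuild cs mask

def pvNpos (cs : List Char) : List Nat :=
  ((pvEnum cs).filter (fun p => p.2 == 'N')).map Prod.fst

theorem pvEnum_map {α β : Type} (f : α → β) (l : List α) :
    pvEnum (l.map f) = (pvEnum l).map (fun p => (p.1, f p.2)) := by
  induction l with
  | nil => rfl
  | cons a as ih => simp [pvEnum, ih, List.map_map, Function.comp]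

theorem pvNpos_cons (c : Char) (cs : List Char) :
    pvNpos (c :: cs) =
      if c == 'N' then 0 :: (pvNpos cs).map (· + 1) else (pvNpos cs).map (· + 1) := by
  unfold pvNpos
  simp only [pvEnum, List.filter_cons, List.filter_map, List.map_map]
  by_cases h : c == 'N' <;> simp [h, Function.comp_def]

theorem pvNpos_length (cs : List Char) : (pvNpos cs).length = pvCountN cs := by
  induction cs with
  | nil => rfl
  | cons c cs ih =>
    rw [pvNpos_cons]
    by_cases h : c == 'N' <;> simp [h, pvCountN, List.filter_cons] <;> exact ih

theorem pvSetBits_pos_shift (mask : Nat) (ps : List (Nat × Nat)) (c : Char) (rest : List Char) :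
    pvSetBits mask (c :: rest) (ps.map (fun jp => (jp.1, jp.2 + 1)))
      = c :: pvSetBits mask rest ps := by
  induction ps generalizing rest with
  | nil => rfl
  | cons p ps ih => simp only [List.map_cons, pvSetBits, List.foldl_cons, List.set] at *; exact ih _

theorem pvSetBits_shift (mask : Nat) (ps : List (Nat × Nat)) (c : Char) (rest : List Char) :
    pvSetBits mask (c :: rest) (ps.map (fun jp => (jp.1 + 1, jp.2 + 1)))
      = c :: pvSetBits (mask / 2) rest ps := by
  induction ps generalizing rest with
  | nil => rfl
  | cons p ps ih =>
    simp only [List.map_cons, pvSetBits, List.foldl_cons, List.set, Nat.testBit_succ] at *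
    exact ih _

theorem pvSetBits_npos (cs : List Char) (mask : Nat) :
    pvSetBits mask cs (pvEnum (pvNpos cs)) = pvBuild cs mask := by
  induction cs generalizing mask with
  | nil => rfl
  | cons c cs ih =>
    rw [pvNpos_cons]
    by_cases h : c == 'N'
    · rw [if_pos h]
      have hmap : pvEnum (0 :: (pvNpos cs).map (· + 1))
          = (0, 0) :: (pvEnum (pvNpos cs)).map (fun p => (p.1 + 1, p.2 + 1)) := by
        simp [pvEnum, pvEnum_map, List.map_map, Function.comp_def]
      rw [hmap]
      have hstep : pvSetBits mask (c :: cs)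
            ((0, 0) :: (pvEnum (pvNpos cs)).map (fun p => (p.1 + 1, p.2 + 1)))
          = pvSetBits mask ((if mask.testBit 0 then 'L' else 'R') :: cs)
            ((pvEnum (pvNpos cs)).map (fun p => (p.1 + 1, p.2 + 1))) := by
        simp [pvSetBits, List.set]
      rw [hstep, pvSetBits_shift, ih]
      simp only [pvBuild, h, if_pos, Nat.testBit_zero]
      by_cases hb : mask % 2 = 1 <;> simp [hb]
    · rw [if_neg h, pvEnum_map, pvSetBits_pos_shift, ih]
      simp [pvBuild, h]

theorem pvCountN_append (cs : List Char) (c : Char) :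
    pvCountN (cs ++ [c]) = pvCountN cs + (if c == 'N' then 1 else 0) := by
  by_cases h : c == 'N' <;> simp [pvCountN, List.filter_append, List.filter_cons, h]

theorem pvBuild_append (cs : List Char) (c : Char) (m : Nat) :
    pvBuild (cs ++ [c]) m
      = pvBuild cs m ++
        [if c == 'N' then (if (m / 2 ^ pvCountN cs) % 2 = 1 then 'L' else 'R') else c] := by
  induction cs generalizing m with
  | nil =>
    by_cases h : c == 'N' <;> simp [pvBuild, h, pvCountN]
  | cons a cs ih =>
    rw [List.cons_append]
    by_cases h : a == 'N'
    · have hk : pvCountN (a :: cs) = pvCountN cs + 1 := by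
        simp [pvCountN, List.filter_cons, h]
      rw [show pvBuild (a :: (cs ++ [c])) m
            = (if m % 2 = 1 then 'L' else 'R') :: pvBuild (cs ++ [c]) (m / 2) from by
          simp [pvBuild, h]]
      rw [show pvBuild (a :: cs) m
            = (if m % 2 = 1 then 'L' else 'R') :: pvBuild cs (m / 2) from by
          simp [pvBuild, h]]
      rw [ih, List.cons_append, hk, Nat.div_div_eq_div_mul,
        show (2 : Nat) * 2 ^ pvCountN cs = 2 ^ (pvCountN cs + 1) from by ring]
    · have hk : pvCountN (a :: cs) = pvCountN cs := by
        simp [pvCountN, List.filter_cons, h]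
      rw [show pvBuild (a :: (cs ++ [c])) m = a :: pvBuild (cs ++ [c]) m from by
          simp [pvBuild, h]]
      rw [show pvBuild (a :: cs) m = a :: pvBuild cs m from by simp [pvBuild, h]]
      rw [ih, List.cons_append, hk]

theorem pvBuild_mod (cs : List Char) (m : Nat) :
    pvBuild cs (m % 2 ^ pvCountN cs) = pvBuild cs m := by
  induction cs generalizing m with
  | nil => rfl
  | cons c cs ih =>
    by_cases h : c == 'N'
    · have hk : pvCountN (c :: cs) = pvCountN cs + 1 := by
        simp [pvCountN, List.filter_cons, h]
      rw [hk]
      have e1 : m % 2 ^ (pvCountN cs + 1) % 2 = m % 2 :=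
        Nat.mod_mod_of_dvd _ ⟨2 ^ pvCountN cs, by ring⟩
      have e2 : m % 2 ^ (pvCountN cs + 1) / 2 = m / 2 % 2 ^ pvCountN cs := by
        rw [show (2 : Nat) ^ (pvCountN cs + 1) = 2 * 2 ^ pvCountN cs from by ring,
          Nat.mod_mul_right_div_self]
      rw [show pvBuild (c :: cs) (m % 2 ^ (pvCountN cs + 1))
            = (if m % 2 ^ (pvCountN cs + 1) % 2 = 1 then 'L' else 'R')
                :: pvBuild cs (m % 2 ^ (pvCountN cs + 1) / 2) from by simp [pvBuild, h]]
      rw [show pvBuild (c :: cs) m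
            = (if m % 2 = 1 then 'L' else 'R') :: pvBuild cs (m / 2) from by
          simp [pvBuild, h]]
      rw [e1, e2, ih]
    · have hk : pvCountN (c :: cs) = pvCountN cs := by
        simp [pvCountN, List.filter_cons, h]
      rw [hk]
      rw [show pvBuild (c :: cs) (m % 2 ^ pvCountN cs)
            = c :: pvBuild cs (m % 2 ^ pvCountN cs) from by simp [pvBuild, h]]
      rw [show pvBuild (c :: cs) m = c :: pvBuild cs m from by simp [pvBuild, h]]
      rw [ih]

theorem pvFoldl_eq_range (cs : List Char) :
    cs.foldl subFpStep [[]] = (List.range (2 ^ pvCountN cs)).map (pvBuild cs) := by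
  induction cs using List.reverseRecOn with
  | nil => simp [pvCountN, pvBuild]
  | append_singleton cs c ih =>
    rw [List.foldl_append, List.foldl_cons, List.foldl_nil, ih]
    by_cases h : c == 'N'
    · have hc : pvCountN (cs ++ [c]) = pvCountN cs + 1 := by
        rw [pvCountN_append, if_pos h]
      rw [hc, subFpStep, if_pos h]
      rw [show (2 : Nat) ^ (pvCountN cs + 1) = 2 ^ pvCountN cs + 2 ^ pvCountN cs by ring]
      rw [List.range_add, List.map_append, List.map_map, List.map_map, List.map_map]
      congr 1
      · apply List.map_congr_left
        intro m hm
        have hm' : m < 2 ^ pvCountN cs := List.mem_range.mp hm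
        simp only [Function.comp]
        rw [pvBuild_append, if_pos h, Nat.div_eq_of_lt hm']
        norm_num
      · apply List.map_congr_left
        intro m hm
        have hm' : m < 2 ^ pvCountN cs := List.mem_range.mp hm
        simp only [Function.comp]
        rw [pvBuild_append, if_pos h]
        have hdiv : (2 ^ pvCountN cs + m) / 2 ^ pvCountN cs = 1 := by
          rw [Nat.add_comm, Nat.add_div_right _ (Nat.two_pow_pos _),
            Nat.div_eq_of_lt hm']
        have hbuild : pvBuild cs (2 ^ pvCountN cs + m) = pvBuild cs m := by
          rw [← pvBuild_mod cs (2 ^ pvCountN cs + m), ← pvBuild_mod cs m]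
          congr 1
          rw [Nat.add_comm, Nat.add_mod_right]
        rw [hdiv, hbuild]
        norm_num
    · have hc : pvCountN (cs ++ [c]) = pvCountN cs := by
        rw [pvCountN_append, if_neg (by simpa using h)]; omega
      rw [hc, subFpStep, if_neg (by simpa using h), List.map_map]
      apply List.map_congr_left
      intro m _
      simp only [Function.comp]
      rw [pvBuild_append, if_neg (by simpa using h)]

theorem sub_fp_eq_alt (fp : String) : sub_fp fp = sub_fp_alt fp := by
  have hlen : (((pvEnum fp.toList).filter (fun p => p.2 == 'N')).map Prod.fst).length
      = (List.filter (fun c => c == 'N') fp.toList).length := pvNpos_length fp.toList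
  simp only [sub_fp, sub_fp_alt, hlen]
  by_cases h0 : (List.filter (fun c => c == 'N') fp.toList).length = 0
  · rw [if_pos h0, if_pos h0]
  · rw [if_neg h0, if_neg h0]
    by_cases h5 : 5 < (List.filter (fun c => c == 'N') fp.toList).length
    · rw [if_pos h5, if_pos h5]
    · rw [if_neg h5, if_neg h5, pvFoldl_eq_range, List.map_map]
      apply List.map_congr_left
      intro m _
      simp only [Function.comp]
      rw [show ((pvEnum fp.toList).filter (fun p => p.2 == 'N')).map Prod.fst
            = pvNpos fp.toList from rfl, pvSetBits_npos]

-- ===== VERDICT (by name: the statement is the Claim_ definition above) =====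
theorem sub_fp_spec : Claim_equal_sub_fp := by
  intro fp _
  unfold Spec_sub_fp
  exact sub_fp_eq_alt fp
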